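-- pv_equiv track=rewrite | github.com/ShirishDX007/python_dsa | palindrome/string_palindrome.py | smallest_largest_palindrome
-- ===== SOURCE A (Python) =====
-- def smallest_largest_palindrome(input_string):
--     words = input_string.split()
--
--     smallest_palindrome = None
--     largest_palindrome = None
--
--     for word in words:
--         if smallest_palindrome is None or word > smallest_palindrome:
--             smallest_palindrome = word
--         if largest_palindrome is None or word < largest_palindrome:
--             largest_palindrome = word
--
--     return smallest_palindrome, largest_palindrome
-- ===== SOURCE B (Python) =====
-- def smallest_largest_palindrome(input_string):
--     words = input_string.split()
--     if not words:
--         return None, None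
--     ws = sorted(words)
--     return ws[-1], ws[0]
-- ===== Notes on version B (the rewrite author's own statement) =====
-- stated objective: alternative
-- what changed: Replaces A's single-pass running max/min fold with two option accumulators by a sort-then-index strategy: sort the word list once and return its last and first elements.
import Mathlib
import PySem

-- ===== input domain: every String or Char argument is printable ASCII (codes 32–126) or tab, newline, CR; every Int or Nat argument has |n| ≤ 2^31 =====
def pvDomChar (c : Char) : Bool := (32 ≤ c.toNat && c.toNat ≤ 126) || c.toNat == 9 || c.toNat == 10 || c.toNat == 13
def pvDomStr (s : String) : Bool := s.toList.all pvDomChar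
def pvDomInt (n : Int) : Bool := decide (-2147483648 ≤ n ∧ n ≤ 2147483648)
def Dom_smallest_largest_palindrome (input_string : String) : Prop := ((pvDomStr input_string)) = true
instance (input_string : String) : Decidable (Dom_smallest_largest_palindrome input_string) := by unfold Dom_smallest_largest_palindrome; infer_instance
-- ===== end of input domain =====

-- B replaces A's single-pass running max/min fold with sort-then-index (no speedup claimed).

-- ===== PORT A =====
def smallest_largest_palindrome (input_string : String) : Option String × Option String :=
  let words := PySem.Str.split₀ input_string
  words.foldl (fun (st : Option String × Option String) word =>
    ( match st.1 with | none => some word | some sp => if sp < word then some word else some sp,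
      match st.2 with | none => some word | some lp => if word < lp then some word else some lp ))
    (none, none)

-- ===== PORT B =====
def smallest_largest_palindrome_alt (input_string : String) : Option String × Option String :=
  let words := PySem.Str.split₀ input_string
  if words = [] then (none, none)
  else
    let ws := PySem.List.sorted words (fun x => x) false
    (PySem.List.pyGet? ws (-1), PySem.List.pyGet? ws 0)

-- ===== PRECONDITION & SPEC =====
def Spec_smallest_largest_palindrome (input_string : String) (out : Option String × Option String) : Prop := out = smallest_largest_palindrome_alt input_string
instance (input_string : String) (out : Option String × Option String) : Decidable (Spec_smallest_largest_palindrome input_string out) := by unfold Spec_smallest_largest_palindrome; infer_instance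

-- ===== CLAIM (what is proved, stated in full; the proofs are below) =====
def Claim_equal_smallest_largest_palindrome : Prop := ∀ (input_string : String), Dom_smallest_largest_palindrome input_string → Spec_smallest_largest_palindrome input_string (smallest_largest_palindrome input_string)

-- ===== LEMMAS AND PROOFS =====

-- A's fold on a pair of some-accumulators is the pair of running-max / running-min folds.
lemma pv_pair_fold (t : List String) : ∀ (a b : String),
    t.foldl (fun (st : Option String × Option String) word =>
      ( match st.1 with | none => some word | some sp => if sp < word then some word else some sp,
        match st.2 with | none => some word | some lp => if word < lp then some word else some lp ))
      (some a, some b)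
    = (some (t.foldl (fun x w => if x < w then w else x) a),
       some (t.foldl (fun x w => if w < x then w else x) b)) := by
  induction t with
  | nil => intro a b; rfl
  | cons h t ih =>
      intro a b
      rw [List.foldl_cons, List.foldl_cons, List.foldl_cons]
      have := ih (if a < h then h else a) (if h < b then h else b)
      simpa [apply_ite] using this

lemma pv_if_max (a w : String) : (if a < w then w else a) = max a w := by
  by_cases h : a < w
  · rw [if_pos h, max_eq_right h.le]
  · rw [if_neg h, max_eq_left (not_lt.mp h)]

lemma pv_if_min (a w : String) : (if w < a then w else a) = min a w := by
  by_cases h : w < a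
  · rw [if_pos h, min_eq_right h.le]
  · rw [if_neg h, min_eq_left (not_lt.mp h)]

-- the last element of a ≤-pairwise list bounds every element
lemma pv_last_ge : ∀ (l : List String), l.Pairwise (fun x y => x ≤ y) →
    ∀ y, l.getLast? = some y → ∀ x ∈ l, x ≤ y := by
  intro l
  induction l with
  | nil => intro _ y hy; simp at hy
  | cons a t ih =>
    intro hp y hy x hx
    rcases List.pairwise_cons.mp hp with ⟨ha, hpt⟩
    cases t with
    | nil =>
      simp at hy hx
      simp [hx, hy]
    | cons b u =>
      rw [List.getLast?_cons_cons] at hy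
      rcases List.mem_cons.mp hx with rfl | hxt
      · exact ha _ (List.mem_of_getLast? hy)
      · exact ih hpt y hy x hxt

lemma pv_main (words : List String) :
    words.foldl (fun (st : Option String × Option String) word =>
      ( match st.1 with | none => some word | some sp => if sp < word then some word else some sp,
        match st.2 with | none => some word | some lp => if word < lp then some word else some lp ))
      (none, none)
    = if words = [] then (none, none)
      else (PySem.List.pyGet? (PySem.List.sorted words (fun x => x) false) (-1),
            PySem.List.pyGet? (PySem.List.sorted words (fun x => x) false) 0) := by
  cases words with
  | nil => rfl
  | cons h t =>
    simp only [reduceCtorEq, if_false]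
    have hA : (h :: t).foldl (fun (st : Option String × Option String) word =>
      ( match st.1 with | none => some word | some sp => if sp < word then some word else some sp,
        match st.2 with | none => some word | some lp => if word < lp then some word else some lp ))
      (none, none)
      = (some (t.foldl max h), some (t.foldl min h)) := by
      have := pv_pair_fold t h h
      simp only [pv_if_max, pv_if_min] at this
      exact this
    rw [hA]
    have hmx : PySem.List.max? (h :: t) (fun y => y) = some (t.foldl max h) :=
      PySem.List.max?_id_cons h t
    have hmn : PySem.List.min? (h :: t) (fun y => y) = some (t.foldl min h) :=
      PySem.List.min?_id_cons h t
    have hsne : PySem.List.sorted (h :: t) (fun x => x) false ≠ [] := by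
      rw [Ne, PySem.List.sorted_eq_nil_iff]; simp
    rcases hsl : PySem.List.sorted (h :: t) (fun x => x) false with _ | ⟨m, r⟩
    · exact absurd hsl hsne
    rw [Prod.mk.injEq]
    refine ⟨?_, ?_⟩
    · -- last of sorted = running max
      rw [PySem.List.pyGet?_neg_one]
      obtain ⟨y, hy⟩ : ∃ y, (m :: r).getLast? = some y :=
        Option.isSome_iff_exists.mp (List.getLast?_isSome.mpr (by simp))
      have hy_mem : y ∈ h :: t :=
        (PySem.List.mem_sorted _ _ _ _).mp (hsl ▸ List.mem_of_getLast? hy)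
      have h1 : y ≤ t.foldl max h := PySem.List.max?_isMax hmx _ hy_mem
      have hpw : (m :: r).Pairwise (fun x y => x ≤ y) := by
        have := PySem.List.sorted_pairwise (h :: t) (fun x : String => x)
        rwa [hsl] at this
      have hmem2 : t.foldl max h ∈ (m :: r) := by
        rw [← hsl, PySem.List.mem_sorted]
        exact PySem.List.max?_mem hmx
      have h2 : t.foldl max h ≤ y := pv_last_ge _ hpw y hy _ hmem2
      rw [hy, le_antisymm h1 h2]
    · -- head of sorted = running min
      rw [PySem.List.pyGet?_zero_cons]
      have hm_mem : m ∈ h :: t :=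
        (PySem.List.mem_sorted _ _ _ _).mp (hsl ▸ (List.mem_cons_self : m ∈ m :: r))
      have h1 : t.foldl min h ≤ m := PySem.List.min?_isMin hmn _ hm_mem
      have hmem2 : t.foldl min h ∈ h :: t := PySem.List.min?_mem hmn
      have h2 : m ≤ t.foldl min h := PySem.List.key_head_sorted_le _ _ hsl _ hmem2
      rw [le_antisymm h2 h1]

-- ===== VERDICT (by name: the statement is the Claim_ definition above) =====
theorem smallest_largest_palindrome_spec : Claim_equal_smallest_largest_palindrome := by
  intro s _
  show smallest_largest_palindrome s = smallest_largest_palindrome_alt s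
  simp only [smallest_largest_palindrome, smallest_largest_palindrome_alt]
  exact pv_main (PySem.Str.split₀ s)
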